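-- pv_equiv track=rewrite | github.com/dkdeconti/sdRNAPeaksIdentification | archive/filter_annot/PeaksFoo.py | intersect_peaks
-- ===== SOURCE A (Python) =====
-- def intersect_peaks(a, b, buf=0):
--     c = {}
--     for k, v in a.items():
--         if k in b:
--             c[k] = [peak for peak in v if intersects_known(peak,
--                                                            b[k],
--                                                            buf=buf)]
--     return c
--
-- def intersects_known(x, v, buf=0):
--     for y in v:
--         if is_intersect(x, y, buf=buf):
--             return True
--     return False
--
-- def is_intersect(x, y, buf=0):
--     return x[1]+buf >= y[0] and x[0]-buf <= y[1]
-- ===== SOURCE B (Python) =====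
-- def intersect_peaks(a, b, buf=0):
--     c = {}
--     for k, v in a.items():
--         if k not in b:
--             continue
--         w = b[k]
--         if not v or not w:
--             c[k] = []
--             continue
--         ws = sorted(w, key=lambda y: y[0])
--         starts = [y[0] for y in ws]
--         maxend = []
--         cur = ws[0][1]
--         for y in ws:
--             cur = max(cur, y[1])
--             maxend.append(cur)
--         kept = []
--         for p in v:
--             t = p[1] + buf
--             lo, hi = 0, len(starts)
--             while lo < hi:
--                 mid = (lo + hi) // 2
--                 if starts[mid] <= t:
--                     lo = mid + 1
--                 else:
--                     hi = mid
--             if lo > 0 and maxend[lo - 1] >= p[0] - buf: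
--                 kept.append(p)
--         c[k] = kept
--     return c
-- ===== Notes on version B (the rewrite author's own statement) =====
-- stated objective: alternative
-- what changed: Per shared key, B sorts the known intervals by start once, builds a prefix-maximum of their ends, and answers each peak's overlap query by binary search instead of A's linear scan of all intervals per peak (asymptotically fewer comparisons, though not measurably faster on the benchmark inputs).
-- outside the precondition, e.g. on intersect_peaks({'k': [[0, 1]]}, {'k': [[5]]}, 0): A returns {'k': []}, B raises IndexError
import Mathlib
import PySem

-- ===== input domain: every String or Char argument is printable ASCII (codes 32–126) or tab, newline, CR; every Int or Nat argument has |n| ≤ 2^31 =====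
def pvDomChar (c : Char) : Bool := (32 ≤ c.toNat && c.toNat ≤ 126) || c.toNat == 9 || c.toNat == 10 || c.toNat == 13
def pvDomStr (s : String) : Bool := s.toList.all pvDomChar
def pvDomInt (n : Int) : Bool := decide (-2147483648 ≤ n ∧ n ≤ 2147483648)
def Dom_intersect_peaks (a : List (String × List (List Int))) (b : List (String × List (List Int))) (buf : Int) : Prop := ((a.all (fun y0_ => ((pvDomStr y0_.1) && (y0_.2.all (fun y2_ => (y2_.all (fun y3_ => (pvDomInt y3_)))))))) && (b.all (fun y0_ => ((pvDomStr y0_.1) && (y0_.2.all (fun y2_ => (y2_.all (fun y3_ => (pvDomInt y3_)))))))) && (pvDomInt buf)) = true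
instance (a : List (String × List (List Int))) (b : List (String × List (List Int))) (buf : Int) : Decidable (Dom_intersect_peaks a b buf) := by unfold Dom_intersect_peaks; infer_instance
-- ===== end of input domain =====

-- B replaces A's per-peak linear scan of the known intervals by a per-key sort +
-- prefix-max-of-ends index queried by binary search (objective: alternative algorithm).


-- shared indexing helpers: x[0] and x[1] (total forms; Pre_ guarantees the index is in range
-- wherever the Pythons evaluate it)
def pvIdx0 (y : List Int) : Int := (PySem.List.pyGet? y 0).getD 0
def pvIdx1 (y : List Int) : Int := (PySem.List.pyGet? y 1).getD 0

-- ===== PORT A =====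
def pvIsIntersect (x y : List Int) (buf : Int) : Bool :=
  decide (pvIdx1 x + buf ≥ pvIdx0 y) && decide (pvIdx0 x - buf ≤ pvIdx1 y)

def pvIntersectsKnown (x : List Int) (v : List (List Int)) (buf : Int) : Bool :=
  v.any (fun y => pvIsIntersect x y buf)

def intersect_peaks (a : List (String × List (List Int))) (b : List (String × List (List Int))) (buf : Int) : List (String × List (List Int)) :=
  a.foldl (fun c kv =>
    match List.lookup kv.1 b with
    | some w => c ++ [(kv.1, kv.2.filter (fun peak => pvIntersectsKnown peak w buf))]
    | none => c) []

-- ===== PORT B =====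
-- the hand-written bisect_right loop of Source B (lo/hi halving)
def pvBisect (starts : List Int) (t : Int) (lo hi : Nat) : Nat :=
  if _h : lo < hi then
    let mid := (lo + hi) / 2
    if starts.getD mid 0 ≤ t then pvBisect starts t (mid + 1) hi
    else pvBisect starts t lo mid
  else lo
termination_by hi - lo
decreasing_by all_goals omega

-- the running-maximum loop over the sorted intervals' ends
def pvRunMax (ws : List (List Int)) (cur : Int) : List Int :=
  match ws with
  | [] => []
  | y :: ys => let c := max cur (pvIdx1 y); c :: pvRunMax ys c

def pvHit (starts maxend : List Int) (buf : Int) (p : List Int) : Bool :=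
  let t := pvIdx1 p + buf
  let lo := pvBisect starts t 0 starts.length
  decide (0 < lo) && decide (maxend.getD (lo - 1) 0 ≥ pvIdx0 p - buf)

def intersect_peaks_alt (a : List (String × List (List Int))) (b : List (String × List (List Int))) (buf : Int) : List (String × List (List Int)) :=
  a.foldl (fun c kv =>
    match List.lookup kv.1 b with
    | none => c
    | some w =>
      if kv.2.isEmpty || w.isEmpty then c ++ [(kv.1, [])]
      else
        let ws := PySem.List.sorted w (fun y => pvIdx0 y)
        let starts := ws.map pvIdx0
        let maxend := pvRunMax ws (pvIdx1 (ws.headD []))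
        c ++ [(kv.1, kv.2.filter (fun p => pvHit starts maxend buf p))]) []

-- ===== PRECONDITION & SPEC =====
-- Pre_ excludes (i) duplicate keys in either association list, which a Python dict argument
-- cannot faithfully represent (the dict collapses them), and (ii) inputs where, under a key
-- present in both dicts with a nonempty counterpart, some peak or known interval has fewer
-- than 2 elements: there Python's x[0]/x[1]/y[0]/y[1] indexing raises IndexError (or A
-- returns only by accident of `and` short-circuiting, where B's index build still raises).
def Pre_intersect_peaks (a : List (String × List (List Int))) (b : List (String × List (List Int))) (buf : Int) : Prop :=
  (a.map Prod.fst).Nodup ∧ (b.map Prod.fst).Nodup ∧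
  ∀ kv ∈ a, ∀ kw ∈ b, kv.1 = kw.1 →
    (kw.2 ≠ [] → ∀ p ∈ kv.2, 2 ≤ p.length) ∧ (kv.2 ≠ [] → ∀ y ∈ kw.2, 2 ≤ y.length)
instance (a : List (String × List (List Int))) (b : List (String × List (List Int))) (buf : Int) : Decidable (Pre_intersect_peaks a b buf) := by unfold Pre_intersect_peaks; infer_instance

def pvWitness_intersect_peaks : (List (String × List (List Int))) × (List (String × List (List Int))) × Int :=
  ([("k", [[0, 5], [9, 12]]), ("m", [[1]])], [("k", [[4, 6], [20, 30]])], 1)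

def Spec_intersect_peaks (a : List (String × List (List Int))) (b : List (String × List (List Int))) (buf : Int) (out : List (String × List (List Int))) : Prop := out = intersect_peaks_alt a b buf
instance (a : List (String × List (List Int))) (b : List (String × List (List Int))) (buf : Int) (out : List (String × List (List Int))) : Decidable (Spec_intersect_peaks a b buf out) := by unfold Spec_intersect_peaks; infer_instance

-- ===== CLAIM (what is proved, stated in full; the proofs are below) =====
def Claim_equal_intersect_peaks : Prop := ∀ (a : List (String × List (List Int))) (b : List (String × List (List Int))) (buf : Int), Dom_intersect_peaks a b buf → Pre_intersect_peaks a b buf → Spec_intersect_peaks a b buf (intersect_peaks a b buf)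

-- ===== LEMMAS AND PROOFS =====

theorem pvWitness_ok : Dom_intersect_peaks pvWitness_intersect_peaks.1 pvWitness_intersect_peaks.2.1 pvWitness_intersect_peaks.2.2 ∧ Pre_intersect_peaks pvWitness_intersect_peaks.1 pvWitness_intersect_peaks.2.1 pvWitness_intersect_peaks.2.2 := by
  decide

-- binary-search invariant: on a ≤-sorted list the loop returns the count of elements ≤ t
theorem pvBisect_inv (xs : List Int) (t : Int)
    (hpw : xs.Pairwise (· ≤ ·)) :
    ∀ (lo hi : Nat), lo ≤ hi → hi ≤ xs.length →
    (∀ j (hj : j < xs.length), j < lo → xs[j] ≤ t) →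
    (∀ j (hj : j < xs.length), hi ≤ j → t < xs[j]) →
    (pvBisect xs t lo hi ≤ xs.length ∧
      (∀ j (hj : j < xs.length), j < pvBisect xs t lo hi → xs[j] ≤ t) ∧
      (∀ j (hj : j < xs.length), pvBisect xs t lo hi ≤ j → t < xs[j])) := by
  have hmono : ∀ i j (hi : i < xs.length) (hj : j < xs.length), i ≤ j → xs[i] ≤ xs[j] := by
    intro i j hi hj hij
    rcases Nat.lt_or_ge i j with h | h
    · exact List.pairwise_iff_getElem.mp hpw i j hi hj h
    · have : i = j := by omega
      subst this; exact le_refl _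
  suffices H : ∀ (d lo hi : Nat), hi - lo ≤ d → lo ≤ hi → hi ≤ xs.length →
      (∀ j (hj : j < xs.length), j < lo → xs[j] ≤ t) →
      (∀ j (hj : j < xs.length), hi ≤ j → t < xs[j]) →
      (pvBisect xs t lo hi ≤ xs.length ∧
        (∀ j (hj : j < xs.length), j < pvBisect xs t lo hi → xs[j] ≤ t) ∧
        (∀ j (hj : j < xs.length), pvBisect xs t lo hi ≤ j → t < xs[j])) by
    intro lo hi h1 h2 h3 h4
    exact H (hi - lo) lo hi (le_refl _) h1 h2 h3 h4
  intro d
  induction d with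
  | zero =>
      intro lo hi hd hlohi hhi hL hR
      have : ¬ lo < hi := by omega
      rw [pvBisect, dif_neg this]
      refine ⟨by omega, fun j hj hjlo => hL j hj hjlo, fun j hj hloj => hR j hj (by omega)⟩
  | succ d ih =>
      intro lo hi hd hlohi hhi hL hR
      by_cases hlt : lo < hi
      · rw [pvBisect, dif_pos hlt]
        have hmid1 : lo ≤ (lo + hi) / 2 := by omega
        have hmid2 : (lo + hi) / 2 < hi := by omega
        have hmidlen : (lo + hi) / 2 < xs.length := by omega
        have hgd : xs.getD ((lo + hi) / 2) 0 = xs[(lo + hi) / 2] :=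
          List.getD_eq_getElem xs 0 hmidlen
        by_cases hc : xs.getD ((lo + hi) / 2) 0 ≤ t
        · rw [if_pos hc]
          refine ih ((lo + hi) / 2 + 1) hi (by omega) (by omega) hhi ?_ hR
          intro j hj hjlt
          calc xs[j] ≤ xs[(lo + hi) / 2] := hmono j _ hj hmidlen (by omega)
            _ ≤ t := by rw [← hgd]; exact hc
        · rw [if_neg hc]
          refine ih lo ((lo + hi) / 2) (by omega) (by omega) (by omega) hL ?_
          intro j hj hjge
          have : t < xs[(lo + hi) / 2] := by rw [← hgd]; omega
          exact lt_of_lt_of_le this (hmono _ j hmidlen hj hjge)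
      · rw [pvBisect, dif_neg hlt]
        exact ⟨by omega, fun j hj hjlo => hL j hj hjlo, fun j hj hloj => hR j hj (by omega)⟩

theorem pvRunMax_getD_ge_iff (ws : List (List Int)) (cur e : Int) (i : Nat) (hi : i < ws.length) :
    (e ≤ (pvRunMax ws cur).getD i 0 ↔
      e ≤ cur ∨ ∃ j, ∃ hj : j < ws.length, j ≤ i ∧ e ≤ pvIdx1 ws[j]) := by
  induction ws generalizing cur i with
  | nil => simp at hi
  | cons y ys ih =>
      cases i with
      | zero =>
          simp only [pvRunMax, List.getD_cons_zero, le_max_iff]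
          constructor
          · rintro (h | h)
            · exact Or.inl h
            · exact Or.inr ⟨0, by simp, by omega, h⟩
          · rintro (h | ⟨j, hj, hji, h⟩)
            · exact Or.inl h
            · have : j = 0 := by omega
              subst this
              simpa using Or.inr h
      | succ i =>
          have hi' : i < ys.length := by simpa using hi
          simp only [pvRunMax, List.getD_cons_succ]
          rw [ih _ _ hi']
          constructor
          · rintro (h | ⟨j, hj, hji, h⟩)
            · rcases le_max_iff.mp h with h' | h'
              · exact Or.inl h'
              · exact Or.inr ⟨0, by simp, by omega, h'⟩
            · exact Or.inr ⟨j + 1, by simpa using Nat.succ_lt_succ hj, by omega, by simpa using h⟩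
          · rintro (h | ⟨j, hj, hji, h⟩)
            · exact Or.inl (le_max_of_le_left h)
            · cases j with
              | zero => exact Or.inl (le_max_of_le_right (by simpa using h))
              | succ j =>
                  exact Or.inr ⟨j, by omega, by omega, by
                    have : (y :: ys)[j + 1] = ys[j]'(by omega) := by simp
                    rw [this] at h; exact h⟩

-- the per-peak queries of the two ports agree (for a nonempty interval list)
theorem pvHit_eq (w : List (List Int)) (buf : Int) (p : List Int) (hw : w ≠ []) :
    pvHit ((PySem.List.sorted w (fun y => pvIdx0 y)).map pvIdx0)
      (pvRunMax (PySem.List.sorted w (fun y => pvIdx0 y))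
        (pvIdx1 ((PySem.List.sorted w (fun y => pvIdx0 y)).headD [])))
      buf p = pvIntersectsKnown p w buf := by
  set ws := PySem.List.sorted w (fun y => pvIdx0 y) with hws
  have hlen : ws.length = w.length := PySem.List.length_sorted w _ _
  have hwsne : ws ≠ [] := by
    intro h
    apply hw
    have := hlen
    rw [h] at this
    exact List.eq_nil_of_length_eq_zero this.symm
  have hn : 0 < ws.length := List.length_pos_iff.mpr hwsne
  set starts := ws.map pvIdx0 with hst
  have hslen : starts.length = ws.length := List.length_map ..
  have hpw : starts.Pairwise (· ≤ ·) := by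
    have := PySem.List.sorted_map_key_pairwise w (fun y => pvIdx0 y)
    simpa [hst, hws] using this
  set t := pvIdx1 p + buf with ht
  set e0 := pvIdx0 p - buf with he0
  obtain ⟨hr_le, hlt, hge⟩ :=
    pvBisect_inv starts t hpw 0 starts.length (by omega) (le_refl _)
      (by intro j hj h; omega) (by intro j hj h; omega)
  set r := pvBisect starts t 0 starts.length with hr
  have hhead : ws.headD [] = ws[0]'hn := by
    simp [List.head?_eq_getElem?, List.getElem?_eq_getElem hn]
  rw [Bool.eq_iff_iff]
  have hA : (pvIntersectsKnown p w buf = true) ↔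
      ∃ y ∈ w, pvIdx0 y ≤ t ∧ e0 ≤ pvIdx1 y := by
    simp only [pvIntersectsKnown, pvIsIntersect, List.any_eq_true, Bool.and_eq_true,
      decide_eq_true_eq, ge_iff_le, ht, he0]
  have hB : (pvHit starts (pvRunMax ws (pvIdx1 (ws.headD []))) buf p = true) ↔
      (0 < r ∧ e0 ≤ (pvRunMax ws (pvIdx1 (ws.headD []))).getD (r - 1) 0) := by
    simp only [pvHit, Bool.and_eq_true, decide_eq_true_eq, ge_iff_le, ← hr, ← ht, ← he0]
  rw [hB, hA]
  have hmemiff : (∃ j, ∃ hj : j < ws.length, pvIdx0 (ws[j]) ≤ t ∧ e0 ≤ pvIdx1 (ws[j])) ↔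
      ∃ y ∈ w, pvIdx0 y ≤ t ∧ e0 ≤ pvIdx1 y := by
    constructor
    · rintro ⟨j, hj, h1, h2⟩
      refine ⟨ws[j], ?_, h1, h2⟩
      rw [← PySem.List.mem_sorted w (fun y => pvIdx0 y) false, ← hws]
      exact List.getElem_mem hj
    · rintro ⟨y, hy, h1, h2⟩
      have : y ∈ ws := by
        rw [hws, PySem.List.mem_sorted]; exact hy
      obtain ⟨j, hj, hyj⟩ := List.mem_iff_getElem.mp this
      exact ⟨j, hj, by rw [hyj]; exact h1, by rw [hyj]; exact h2⟩
  rw [← hmemiff]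
  constructor
  · rintro ⟨hrpos, hmax⟩
    have hr1 : r - 1 < ws.length := by omega
    have := (pvRunMax_getD_ge_iff ws (pvIdx1 (ws.headD [])) e0 (r - 1) hr1).mp hmax
    rcases this with h | ⟨j, hj, hji, h⟩
    · refine ⟨0, hn, ?_, by rwa [hhead] at h⟩
      have := hlt 0 (by omega) (by omega)
      simpa [hst] using this
    · refine ⟨j, hj, ?_, h⟩
      have := hlt j (by omega) (by omega)
      simpa [hst] using this
  · rintro ⟨j, hj, h1, h2⟩
    have hjr : j < r := by
      by_contra hcon
      have := hge j (by omega) (by omega)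
      have hsj : starts[j]'(by omega) = pvIdx0 (ws[j]) := by simp [hst]
      rw [hsj] at this
      omega
    refine ⟨by omega, ?_⟩
    exact (pvRunMax_getD_ge_iff ws (pvIdx1 (ws.headD [])) e0 (r - 1) (by omega)).mpr
      (Or.inr ⟨j, hj, by omega, h2⟩)

-- per-element step equality of the two folds
theorem step_eq (b : List (String × List (List Int))) (buf : Int)
    (c : List (String × List (List Int))) (kv : String × List (List Int)) :
    (match List.lookup kv.1 b with
      | some w => c ++ [(kv.1, kv.2.filter (fun peak => pvIntersectsKnown peak w buf))]
      | none => c) =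
    (match List.lookup kv.1 b with
      | none => c
      | some w =>
        if kv.2.isEmpty || w.isEmpty then c ++ [(kv.1, [])]
        else
          let ws := PySem.List.sorted w (fun y => pvIdx0 y)
          let starts := ws.map pvIdx0
          let maxend := pvRunMax ws (pvIdx1 (ws.headD []))
          c ++ [(kv.1, kv.2.filter (fun p => pvHit starts maxend buf p))]) := by
  cases hlk : List.lookup kv.1 b with
  | none => rfl
  | some w =>
      simp only []
      by_cases hv : kv.2.isEmpty
      · rw [if_pos (by simp [hv])]
        have : kv.2 = [] := by simpa [List.isEmpty_iff] using hv
        simp [this]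
      · by_cases hwe : w.isEmpty
        · rw [if_pos (by simp [hwe])]
          have : w = [] := by simpa [List.isEmpty_iff] using hwe
          simp [this, pvIntersectsKnown]
        · rw [if_neg (by simp [hv, hwe])]
          have hw : w ≠ [] := by simpa [List.isEmpty_iff] using hwe
          have : ∀ p ∈ kv.2, (fun peak => pvIntersectsKnown peak w buf) p =
              (fun p => pvHit ((PySem.List.sorted w (fun y => pvIdx0 y)).map pvIdx0)
                (pvRunMax (PySem.List.sorted w (fun y => pvIdx0 y))
                  (pvIdx1 ((PySem.List.sorted w (fun y => pvIdx0 y)).headD []))) buf p) p := by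
            intro p _
            exact (pvHit_eq w buf p hw).symm
          rw [List.filter_congr this]

-- ===== VERDICT (by name: the statement is the Claim_ definition above) =====
theorem intersect_peaks_spec : Claim_equal_intersect_peaks := by
  intro a b buf _hdom _hpre
  unfold Spec_intersect_peaks intersect_peaks intersect_peaks_alt
  exact congrArg (fun f => a.foldl f [])
    (funext fun c => funext fun kv => step_eq b buf c kv)
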